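-- pv_equiv track=rewrite | github.com/konradmaciejczyk/algorithms-and-data-structures-collection | math_algorithms/math_algorithms.py | horner
-- ===== SOURCE A (Python) =====
-- def horner(cooficients, root):
--     aux = cooficients[0]
--     n = len(cooficients)
--     result = [aux]
--
--     i = 0
--     while i <= n -2:
--         result.append(result[i] * root + cooficients[i+1])
--         i += 1
--
--     remainder = result[n - 1]
--     result.pop(len(result) - 1)
--
--     return (result, remainder)
-- ===== SOURCE B (Python) =====
-- def horner(cooficients, root):
--     n = len(cooficients)
--     # power table: powers[k] = root ** k
--     powers = [1]
--     for _ in range(n - 1):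
--         powers.append(powers[-1] * root)
--
--     def coef(i):
--         # closed form: i-th synthetic-division coefficient is the prefix power sum
--         return sum(cooficients[j] * powers[i - j] for j in range(i + 1))
--
--     return ([coef(i) for i in range(n - 1)], coef(n - 1))
-- ===== Notes on version B (the rewrite author's own statement) =====
-- stated objective: alternative
-- what changed: Replaces A's sequential Horner recurrence over a growing index-driven list (read-back, pop) with independent closed-form evaluation of each output coefficient as the prefix power sum sum_j cooficients[j]*powers[i-j] over a precomputed power table; no recurrence state is carried between outputs.
import Mathlib
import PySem

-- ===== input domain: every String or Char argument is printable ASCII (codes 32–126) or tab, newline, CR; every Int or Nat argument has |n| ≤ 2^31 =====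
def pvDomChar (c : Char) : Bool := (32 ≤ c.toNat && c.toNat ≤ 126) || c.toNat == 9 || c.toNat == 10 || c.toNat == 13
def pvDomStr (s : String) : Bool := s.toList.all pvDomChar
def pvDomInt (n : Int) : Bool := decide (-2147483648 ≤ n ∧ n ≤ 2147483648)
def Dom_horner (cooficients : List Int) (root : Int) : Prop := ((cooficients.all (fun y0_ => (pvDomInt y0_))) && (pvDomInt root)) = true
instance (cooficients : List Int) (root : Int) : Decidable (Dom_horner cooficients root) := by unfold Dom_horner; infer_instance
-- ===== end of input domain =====

-- B replaces A's sequential index-driven Horner loop by an independent closed-form power sum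
-- for each output coefficient over a precomputed power table (alternative algorithm, not faster).


-- ===== PORT A =====
def horner (cooficients : List Int) (root : Int) : List Int × Int :=
  let aux := (PySem.List.pyGet? cooficients 0).getD 0
  let n : Int := cooficients.length
  let result :=
    (PySem.List.pyRange 0 (n - 1) 1).foldl
      (fun res i =>
        res ++ [(PySem.List.pyGet? res i).getD 0 * root +
                (PySem.List.pyGet? cooficients (i + 1)).getD 0])
      [aux]
  let remainder := (PySem.List.pyGet? result (n - 1)).getD 0
  let result' := ((PySem.List.pop? result ((result.length : Int) - 1)).map Prod.snd).getD result
  (result', remainder)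

-- ===== PORT B =====
def horner_alt (cooficients : List Int) (root : Int) : List Int × Int :=
  let n : Int := cooficients.length
  let powers :=
    (PySem.List.pyRange 0 (n - 1) 1).foldl
      (fun p _ => p ++ [(PySem.List.pyGet? p (-1)).getD 0 * root]) [1]
  let coef : Int → Int :=
    fun i =>
      (PySem.List.pyRange 0 (i + 1) 1).foldl
        (fun s j => s + (PySem.List.pyGet? cooficients j).getD 0 *
                        (PySem.List.pyGet? powers (i - j)).getD 0) 0
  ((PySem.List.pyRange 0 (n - 1) 1).map coef, coef (n - 1))

-- ===== PRECONDITION & SPEC =====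
-- Pre_ excludes only the empty coefficient list, on which A raises IndexError.
def Pre_horner (cooficients : List Int) (root : Int) : Prop := cooficients ≠ []
instance (cooficients : List Int) (root : Int) : Decidable (Pre_horner cooficients root) := by unfold Pre_horner; infer_instance
def pvWitness_horner : List Int × Int := ([2, -3, 1], 2)
def Spec_horner (cooficients : List Int) (root : Int) (out : List Int × Int) : Prop := out = horner_alt cooficients root
instance (cooficients : List Int) (root : Int) (out : List Int × Int) : Decidable (Spec_horner cooficients root out) := by unfold Spec_horner; infer_instance

-- ===== CLAIM (what is proved, stated in full; the proofs are below) =====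
def Claim_equal_horner : Prop := ∀ (cooficients : List Int) (root : Int), Dom_horner cooficients root → Pre_horner cooficients root → Spec_horner cooficients root (horner cooficients root)

-- ===== LEMMAS AND PROOFS =====

-- The full chain of Horner accumulators starting from acc over the remaining coefficients.
def chain (root acc : Int) : List Int → List Int
  | [] => [acc]
  | c :: cs => acc :: chain root (acc * root + c) cs

theorem chain_length (root acc : Int) (cs : List Int) : (chain root acc cs).length = cs.length + 1 := by
  induction cs generalizing acc with
  | nil => simp [chain]
  | cons c cs ih => simp [chain, ih]

-- A's while loop builds exactly the chain.
theorem loopA (cooficients : List Int) (root : Int) :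
    ∀ (rest : List Int) (j : Nat) (pre : List Int) (acc : Int)
      (hdrop : cooficients.drop (j + 1) = rest)
      (hne : pre ≠ []) (hlast : pre.getLast hne = acc) (hlen : pre.length = j + 1),
      (PySem.List.pyRange (j : Int) ((j : Int) + rest.length) 1).foldl
        (fun res i =>
          res ++ [(PySem.List.pyGet? res i).getD 0 * root +
                  (PySem.List.pyGet? cooficients (i + 1)).getD 0]) pre
      = pre.dropLast ++ chain root acc rest := by
  intro rest
  induction rest with
  | nil =>
    intro j pre acc hdrop hne hlast hlen
    rw [PySem.List.pyRange_one_eq_nil (by simp)]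
    simp only [List.foldl_nil, chain]
    rw [← hlast, List.dropLast_append_getLast hne]
  | cons c cs ih =>
    intro j pre acc hdrop hne hlast hlen
    have hjlt : (j : Int) < (j : Int) + ((c :: cs).length : Int) := by simp
    rw [PySem.List.pyRange_one_cons hjlt, List.foldl_cons]
    have hgetpre : (PySem.List.pyGet? pre (j : Int)).getD 0 = acc := by
      have hj : j < pre.length := by omega
      rw [PySem.List.pyGet?_natCast]
      rw [List.getElem?_eq_getElem hj]
      simp only [Option.getD_some]
      rw [← hlast, List.getLast_eq_getElem]
      congr 1
      omega
    have hgetc : (PySem.List.pyGet? cooficients ((j : Int) + 1)).getD 0 = c := by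
      have : cooficients[j + 1]? = some c := by
        have := congrArg (fun l => l.head? ) hdrop
        simpa [List.head?_drop] using this
      have hcast : ((j : Int) + 1) = ((j + 1 : Nat) : Int) := by push_cast; ring
      rw [hcast, PySem.List.pyGet?_natCast, this, Option.getD_some]
    rw [hgetpre, hgetc]
    set pre' := pre ++ [acc * root + c] with hpre'
    have hne' : pre' ≠ [] := by simp [hpre']
    have h1 : ((j : Int) + ((c :: cs).length : Int)) = ((j + 1 : Nat) : Int) + (cs.length : Int) := by
      push_cast; simp; ring
    rw [h1, show ((j : Int) + 1) = (((j + 1 : Nat)) : Int) by push_cast; ring]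
    have hdrop' : cooficients.drop ((j + 1) + 1) = cs := by
      have h := congrArg List.tail hdrop
      simpa [List.tail_drop] using h
    rw [ih (j + 1) pre' (acc * root + c) hdrop' hne' (by simp [hpre']) (by simp [hpre']; omega)]
    rw [show pre'.dropLast = pre.dropLast ++ [acc] by
      rw [hpre', List.dropLast_concat, ← hlast, List.dropLast_append_getLast hne]]
    simp [chain]

theorem eraseIdx_last {α : Type} (l : List α) : l.eraseIdx (l.length - 1) = l.dropLast := by
  induction l with
  | nil => rfl
  | cons x xs ih =>
    cases xs with
    | nil => rfl
    | cons y ys =>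
      have h : (x :: y :: ys).length - 1 = ((y :: ys).length - 1) + 1 := by simp
      rw [h, List.eraseIdx_cons_succ, ih]
      exact (List.dropLast_cons_of_ne_nil (by simp)).symm

-- The closed-form prefix power sum, in structural form.
def csum (r : Int) : List Int → Nat → Int
  | [], _ => 0
  | a :: _, 0 => a
  | a :: cs, (k+1) => a * r ^ (k + 1) + csum r cs k

theorem csum_shift (r a c : Int) (cs : List Int) (k : Nat) :
    csum r ((a * r + c) :: cs) k = csum r (a :: c :: cs) (k + 1) := by
  cases k with
  | zero => simp [csum]
  | succ k => simp [csum]; ring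

-- The k-th Horner accumulator equals the closed-form prefix power sum.
theorem chain_getD (r : Int) :
    ∀ (cs : List Int) (a : Int) (k : Nat), k ≤ cs.length →
      (chain r a cs).getD k 0 = csum r (a :: cs) k := by
  intro cs
  induction cs with
  | nil =>
    intro a k hk
    have hk0 : k = 0 := by simpa using hk
    subst hk0
    simp [chain, csum]
  | cons c cs ih =>
    intro a k hk
    cases k with
    | zero => simp [chain, csum]
    | succ k =>
      have hk' : k ≤ cs.length := by simpa using hk
      calc (chain r a (c :: cs)).getD (k + 1) 0
          = (chain r (a * r + c) cs).getD k 0 := by simp [chain]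
        _ = csum r ((a * r + c) :: cs) k := ih _ k hk'
        _ = csum r (a :: c :: cs) (k + 1) := csum_shift r a c cs k

-- The mapped-range sum equals the structural csum (for every index and list).
theorem sum_eq_csum (r : Int) :
    ∀ (l : List Int) (k : Nat),
      (((List.range (k + 1)).map (fun j => l.getD j 0 * r ^ (k - j))).sum) = csum r l k := by
  intro l
  induction l with
  | nil =>
    intro k
    have : ∀ j, ([] : List Int).getD j 0 * r ^ (k - j) = 0 := by intro j; simp
    rw [List.map_congr_left fun j _ => this j]
    simp [csum]
  | cons a cs ih =>
    intro k
    cases k with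
    | zero => simp [csum]
    | succ k =>
      rw [List.range_succ_eq_map, List.map_cons, List.sum_cons, List.map_map]
      have hmap : ((List.range (k + 1)).map (fun j => (a :: cs).getD (j + 1) 0 * r ^ (k + 1 - (j + 1)))) =
          ((List.range (k + 1)).map (fun j => cs.getD j 0 * r ^ (k - j))) := by
        apply List.map_congr_left
        intro j hj
        simp
      simp only [Function.comp_def, Nat.succ_eq_add_one]
      rw [hmap, ih k]
      simp [csum]

theorem foldl_add_map {α : Type} (f : α → Int) :
    ∀ (l : List α) (init : Int), l.foldl (fun s x => s + f x) init = init + (l.map f).sum := by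
  intro l
  induction l with
  | nil => intro init; simp
  | cons x xs ih => intro init; simp [ih]; ring

-- B's power table is the list of powers of root.
theorem powloop (root : Int) :
    ∀ m : Nat, (PySem.List.pyRange 0 (m : Int) 1).foldl
        (fun p _ => p ++ [(PySem.List.pyGet? p (-1)).getD 0 * root]) [1]
      = (List.range (m + 1)).map (fun t => root ^ t) := by
  intro m
  induction m with
  | zero => simp
  | succ m ih =>
    rw [show ((m + 1 : Nat) : Int) = (m : Int) + 1 by push_cast; ring,
      PySem.List.pyRange_one_succ_right (by positivity), List.foldl_append, ih, List.foldl_cons,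
      List.foldl_nil]
    have hlast : (PySem.List.pyGet? ((List.range (m + 1)).map (fun t => root ^ t)) (-1)).getD 0
        = root ^ m := by
      rw [show (List.range (m + 1)) = List.range m ++ [m] from List.range_succ,
        List.map_append, List.map_singleton, PySem.List.pyGet?_neg_one_append_singleton,
        Option.getD_some]
    rw [hlast]
    simp [List.range_succ, pow_succ]

-- Looking up the power table at a natural index in range.
theorem pget_pow (root : Int) (N t : Nat) (ht : t < N) :
    (PySem.List.pyGet? ((List.range N).map (fun t => root ^ t)) ((t : Nat) : Int)).getD 0
      = root ^ t := by
  rw [PySem.List.pyGet?_natCast, List.getElem?_map, List.getElem?_range ht]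
  rfl

-- B's inner generator sum computes csum at every natural index.
theorem coefB_eq (l : List Int) (r : Int) (N m : Nat) (hm : m < N) :
    (PySem.List.pyRange 0 ((m : Int) + 1) 1).foldl
      (fun s j => s + (PySem.List.pyGet? l j).getD 0 *
                      (PySem.List.pyGet? ((List.range N).map (fun t => r ^ t)) ((m : Int) - j)).getD 0) 0
    = csum r l m := by
  rw [PySem.List.pyRange_one]
  have htn : (((m : Int) + 1) - 0).toNat = m + 1 := by omega
  rw [htn]
  simp only [List.foldl_map, zero_add]
  rw [foldl_add_map (fun k : Nat => (PySem.List.pyGet? l (k : Int)).getD 0 *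
      (PySem.List.pyGet? ((List.range N).map (fun t => r ^ t)) ((m : Int) - (k : Int))).getD 0),
    zero_add, ← sum_eq_csum r l m]
  apply congrArg
  apply List.map_congr_left
  intro j hj
  have hjm : j ≤ m := by have := List.mem_range.mp hj; omega
  rw [show ((m : Int) - (j : Int)) = (((m - j : Nat)) : Int) by omega,
    pget_pow r N (m - j) (by omega), PySem.List.pyGet?_natCast]
  simp [List.getD_eq_getElem?_getD]

-- ===== VERDICT (by name: the statement is the Claim_ definition above) =====
theorem horner_spec : Claim_equal_horner := by
  intro cooficients root _ hpre
  unfold Spec_horner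
  obtain ⟨a, rest, rfl⟩ : ∃ a rest, cooficients = a :: rest := by
    cases cooficients with
    | nil => exact absurd rfl hpre
    | cons a rest => exact ⟨a, rest, rfl⟩
  unfold horner horner_alt
  simp only [PySem.List.pyGet?_zero_cons, Option.getD_some]
  have hA : (PySem.List.pyRange 0 (((a :: rest).length : Int) - 1) 1).foldl
        (fun res i =>
          res ++ [(PySem.List.pyGet? res i).getD 0 * root +
                  (PySem.List.pyGet? (a :: rest) (i + 1)).getD 0]) [a]
      = chain root a rest := by
    have hL := loopA (a :: rest) root rest 0 [a] a (by simp) (by simp) (by simp) (by simp)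
    simp only [Nat.cast_zero, zero_add, List.dropLast, List.nil_append] at hL
    rw [show ((a :: rest).length : Int) - 1 = (rest.length : Int) by simp]
    exact hL
  rw [hA]
  have hlenc : (chain root a rest).length = rest.length + 1 := chain_length root a rest
  -- the power table
  have hP : (PySem.List.pyRange 0 (((a :: rest).length : Int) - 1) 1).foldl
        (fun p _ => p ++ [(PySem.List.pyGet? p (-1)).getD 0 * root]) [1]
      = (List.range (rest.length + 1)).map (fun t => root ^ t) := by
    rw [show ((a :: rest).length : Int) - 1 = ((rest.length : Nat) : Int) by simp]
    exact powloop root rest.length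
  rw [hP]
  -- remainder of A
  have hget : (PySem.List.pyGet? (chain root a rest) (((a :: rest).length : Int) - 1)).getD 0
      = csum root (a :: rest) rest.length := by
    rw [show ((a :: rest).length : Int) - 1 = ((rest.length : Nat) : Int) by simp,
      PySem.List.pyGet?_natCast]
    rw [← chain_getD root rest a rest.length (le_refl _)]
    simp [List.getD_eq_getElem?_getD]
  -- pop of A
  have hpop : ((PySem.List.pop? (chain root a rest) (((chain root a rest).length : Int) - 1)).map
        Prod.snd).getD (chain root a rest) = (chain root a rest).dropLast := by
    rw [show ((chain root a rest).length : Int) - 1 = (((chain root a rest).length - 1 : Nat) : Int) by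
      rw [hlenc]; push_cast; simp]
    rw [PySem.List.pop?_natCast (chain root a rest) ((chain root a rest).length - 1) (by omega)]
    simp only [Option.map_some, Option.getD_some]
    exact eraseIdx_last (chain root a rest)
  rw [hget, hpop]
  -- B's remainder
  have hBrem : (PySem.List.pyRange 0 ((((a :: rest).length : Int) - 1) + 1) 1).foldl
      (fun s j => s + (PySem.List.pyGet? (a :: rest) j).getD 0 *
        (PySem.List.pyGet? ((List.range (rest.length + 1)).map (fun t => root ^ t))
          ((((a :: rest).length : Int) - 1) - j)).getD 0) 0
      = csum root (a :: rest) rest.length := by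
    have h := coefB_eq (a :: rest) root (rest.length + 1) rest.length (by omega)
    rw [show ((a :: rest).length : Int) - 1 = ((rest.length : Nat) : Int) by simp]
    exact h
  -- B's quotient versus chain.dropLast
  have hquot : (chain root a rest).dropLast =
      (PySem.List.pyRange 0 (((a :: rest).length : Int) - 1) 1).map
        (fun i => (PySem.List.pyRange 0 (i + 1) 1).foldl
          (fun s j => s + (PySem.List.pyGet? (a :: rest) j).getD 0 *
            (PySem.List.pyGet? ((List.range (rest.length + 1)).map (fun t => root ^ t))
              (i - j)).getD 0) 0) := by
    apply List.ext_getElem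
    · simp [hlenc, PySem.List.length_pyRange_one]
    · intro k hk1 hk2
      have hk : k < rest.length := by
        have := hk1; rw [List.length_dropLast, hlenc] at this; omega
      have hkc : k < (chain root a rest).length := by omega
      have hcg : (chain root a rest).getD k 0 = (chain root a rest)[k] := by
        rw [List.getD_eq_getElem?_getD, List.getElem?_eq_getElem hkc]
        rfl
      rw [List.getElem_dropLast, List.getElem_map, PySem.List.getElem_pyRange_one]
      have hidx : (0 : Int) + k = ((k : Nat) : Int) := by simp
      rw [hidx, coefB_eq (a :: rest) root (rest.length + 1) k (by omega),
        ← chain_getD root rest a k (le_of_lt hk)]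
      exact hcg.symm
  rw [hquot, hBrem]
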